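-- pv_equiv track=rewrite | github.com/the-zebulan/CodeWars | katas/beta/what_color_is_your_name.py | string_color
-- ===== SOURCE A (Python) =====
-- def string_color(name):
--     first_char = length = other_chars = sum_chars = 0
--     prod_chars = 1
--     for i, a in enumerate(name):
--         current = ord(a)
--         length += 1
--         if i == 0:
--             first_char = current
--         else:
--             other_chars += current
--         prod_chars *= current
--         sum_chars += current
--     if length < 2:
--         return None
--     return '{:02X}{:02X}{:02X}'.format(
--         sum_chars % 255, prod_chars % 255, abs(first_char - other_chars) % 255
--     )
-- ===== SOURCE B (Python) =====
-- def string_color(name):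
--     if len(name) < 2:
--         return None
--     freq = {}
--     for ch in name:
--         freq[ch] = freq.get(ch, 0) + 1
--     total = sum(ord(ch) * k for ch, k in freq.items())
--     prod = 1
--     for ch, k in freq.items():
--         prod = prod * pow(ord(ch), k, 255) % 255
--     first = ord(name[0])
--     return '{:02X}{:02X}{:02X}'.format(
--         total % 255, prod, abs(first - (total - first)) % 255
--     )
-- ===== Notes on version B (the rewrite author's own statement) =====
-- stated objective: faster
-- what changed: B replaces A's single five-accumulator loop with its unbounded bignum product by a character frequency table: the sum becomes code*count over distinct characters and the product becomes modular exponentiation pow(code, count, 255) per distinct character, so no big integer is ever built.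
import Mathlib
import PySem

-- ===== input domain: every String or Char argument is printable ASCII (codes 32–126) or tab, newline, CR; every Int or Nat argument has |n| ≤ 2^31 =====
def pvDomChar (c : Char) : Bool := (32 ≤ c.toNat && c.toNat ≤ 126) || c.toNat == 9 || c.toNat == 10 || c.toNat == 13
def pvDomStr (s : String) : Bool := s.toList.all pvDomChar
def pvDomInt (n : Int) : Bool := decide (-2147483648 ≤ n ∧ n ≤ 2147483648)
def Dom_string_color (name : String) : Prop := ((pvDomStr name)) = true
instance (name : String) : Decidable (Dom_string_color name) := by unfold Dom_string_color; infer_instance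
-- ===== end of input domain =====

-- B replaces A's five-accumulator loop with an unbounded bignum product by a character
-- frequency table: the sum comes from code*count over distinct characters and the product
-- from modular exponentiation pow(code, count, 255), so no big integer is ever built (faster).

-- '{:02X}'.format(n) for 0 ≤ n < 256 (exact there: two uppercase hex digits, zero-padded);
-- both Pythons format only values in [0, 255), where this is exact.
def pvHexDigit (n : Nat) : Char := ("0123456789ABCDEF".toList).getD n '0'
def pvHex2 (n : Int) : String := String.ofList [pvHexDigit (n.toNat / 16), pvHexDigit (n.toNat % 16)]

-- ===== PORT A =====
-- the body of A's 'for i, a in enumerate(name)' loop, on the state (first_char, length, other_chars, sum_chars, prod_chars)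
def pvStepA (st : Int × Int × Int × Int × Int) (ia : Int × Char) : Int × Int × Int × Int × Int :=
  match st with
  | (first_char, length, other_chars, sum_chars, prod_chars) =>
    let current : Int := (ia.2.toNat : Int)
    let length := length + 1
    let first_char := if ia.1 == 0 then current else first_char
    let other_chars := if ia.1 == 0 then other_chars else other_chars + current
    (first_char, length, other_chars, sum_chars + current, prod_chars * current)

def string_color (name : String) : Option String :=
  let st := (PySem.List.enumerate name.toList).foldl pvStepA (0, 0, 0, 0, 1)
  if st.2.1 < 2 then none
  else some (pvHex2 (PySem.Int.mod st.2.2.2.1 255) ++ pvHex2 (PySem.Int.mod st.2.2.2.2 255)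
             ++ pvHex2 (PySem.Int.mod |st.1 - st.2.2.1| 255))

-- ===== PORT B =====
def string_color_alt (name : String) : Option String :=
  let cs := name.toList
  if cs.length < 2 then none
  else
    -- the freq-building loop 'freq[ch] = freq.get(ch, 0) + 1'
    let freq := cs.foldl (fun d x => d.insert x (d.getD x 0 + 1)) PySem.Dict.empty
    let total := (freq.items.map (fun p => ((p.1.toNat : Int)) * p.2)).sum
    -- pow(ord(ch), k, 255) = PySem.Int.powMod; counts are ≥ 1, so the Nat exponent .toNat is exact
    let prod := freq.items.foldl
      (fun p q => PySem.Int.mod (p * PySem.Int.powMod ((q.1.toNat : Int)) q.2.toNat 255) 255) 1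
    -- ord(name[0]): the length branch guarantees cs ≠ [], so headD is exact here
    let first : Int := ((cs.headD ' ').toNat : Int)
    some (pvHex2 (PySem.Int.mod total 255) ++ pvHex2 prod
          ++ pvHex2 (PySem.Int.mod |first - (total - first)| 255))

-- ===== PRECONDITION & SPEC =====
def Spec_string_color (name : String) (out : Option String) : Prop := out = string_color_alt name
instance (name : String) (out : Option String) : Decidable (Spec_string_color name out) := by unfold Spec_string_color; infer_instance

-- ===== CLAIM (what is proved, stated in full; the proofs are below) =====
def Claim_equal_string_color : Prop := ∀ (name : String), Dom_string_color name → Spec_string_color name (string_color name)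

-- ===== LEMMAS AND PROOFS =====

-- on the tail (indices ≥ 1) the i == 0 branch of A's loop never fires
theorem pvFoldA_tail (t : List Char) : ∀ (s : Int), 1 ≤ s → ∀ (f len o sm pr : Int),
    (PySem.List.enumerate t s).foldl pvStepA (f, len, o, sm, pr)
      = (f, len + t.length, o + (t.map (fun c => (c.toNat : Int))).sum,
         sm + (t.map (fun c => (c.toNat : Int))).sum, pr * (t.map (fun c => (c.toNat : Int))).prod) := by
  induction t with
  | nil => intro s hs f len o sm pr; simp [PySem.List.enumerate_nil]
  | cons c t ih =>
    intro s hs f len o sm pr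
    have hsne : (s == 0) = false := by simp; omega
    rw [PySem.List.enumerate_cons]
    simp only [List.foldl_cons, pvStepA, hsne]
    rw [ih (s + 1) (by omega)]
    simp
    refine ⟨by omega, by ring, by ring, by ring⟩

-- the distinct-character list of cs has the same Finset of elements as cs
theorem pvToFinset (cs : List Char) : (PySem.Set.ofList cs).toFinset = cs.toFinset := by
  ext x; simp [List.mem_toFinset, PySem.Set.mem_ofList]

-- summing f(k)·count(k) over the distinct characters is summing f over the string
theorem pvSumCounts (cs : List Char) (f : Char → Int) :
    ((PySem.Set.ofList cs).map (fun k => f k * (cs.count k : Int))).sum = (cs.map f).sum := by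
  have h := Finset.sum_multiset_map_count (↑cs : Multiset Char) f
  rw [Multiset.map_coe, Multiset.sum_coe] at h
  rw [← List.sum_toFinset _ (PySem.Set.nodup_ofList cs), pvToFinset, ← List.toFinset_coe, h]
  apply Finset.sum_congr rfl
  intro m _
  rw [Multiset.coe_count, nsmul_eq_mul]
  ring

-- multiplying f(k)^count(k) over the distinct characters is multiplying f over the string
theorem pvProdCounts (cs : List Char) (f : Char → Int) :
    ((PySem.Set.ofList cs).map (fun k => f k ^ (cs.count k))).prod = (cs.map f).prod := by
  have h := Finset.prod_multiset_map_count (↑cs : Multiset Char) f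
  rw [Multiset.map_coe, Multiset.prod_coe] at h
  rw [← List.prod_toFinset _ (PySem.Set.nodup_ofList cs), pvToFinset, ← List.toFinset_coe, h]
  apply Finset.prod_congr rfl
  intro m _
  rw [Multiset.coe_count]

-- B's fold 'prod = prod * (h k % 255) % 255' computes the product of h modulo 255
theorem pvFoldMod (l : List Char) (h : Char → Int) : ∀ (a : Int), a % 255 = a →
    l.foldl (fun p k => PySem.Int.mod (p * PySem.Int.mod (h k) 255) 255) a
      = PySem.Int.mod (a * (l.map h).prod) 255 := by
  induction l with
  | nil =>
    intro a ha
    simp only [List.foldl_nil, List.map_nil, List.prod_nil, mul_one]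
    rw [PySem.Int.mod_eq_emod_of_pos (by norm_num), ha]
  | cons c t ih =>
    intro a ha
    simp only [List.foldl_cons, List.map_cons, List.prod_cons]
    rw [ih _ (by rw [PySem.Int.mod_eq_emod_of_pos (by norm_num)]; exact Int.emod_emod_of_dvd _ dvd_rfl)]
    simp only [PySem.Int.mod_eq_emod_of_pos (show (0:Int) < 255 by norm_num)]
    have hx : h c % 255 ≡ h c [ZMOD 255] := Int.emod_emod_of_dvd _ dvd_rfl
    have h2 : (a * (h c % 255)) % 255 ≡ a * h c [ZMOD 255] :=
      (Int.emod_emod_of_dvd _ dvd_rfl :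
        (a * (h c % 255)) % 255 ≡ a * (h c % 255) [ZMOD 255]).trans (hx.mul_left a)
    have h3 := h2.mul_right (List.map h t).prod
    rw [mul_assoc] at h3
    exact h3

-- ===== VERDICT (by name: the statement is the Claim_ definition above) =====
theorem string_color_spec : Claim_equal_string_color := by
  intro name _
  unfold Spec_string_color string_color string_color_alt
  cases hl : name.toList with
  | nil => simp [PySem.List.enumerate_nil]
  | cons c t =>
    simp only [List.headD_cons]   -- zeta-reduces the let-bindings, substituting cs := c :: t
    -- rewrite B's side first (counter dict and its items), so A's foldl unfolding cannot touch it
    rw [PySem.Dict.foldl_insert_getD_add_one_eq_counter, PySem.Dict.items_counter]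
    rw [PySem.List.enumerate_cons]
    simp only [List.foldl_cons, zero_add]
    have h0 : pvStepA ((0 : Int), 0, 0, 0, 1) (0, c)
        = ((c.toNat : Int), 1, 0, (c.toNat : Int), (c.toNat : Int)) := by
      simp [pvStepA]
    rw [h0, pvFoldA_tail t 1 (le_refl 1)]
    by_cases ht : t = []
    · subst ht; simp
    · have htl : 0 < t.length := List.length_pos_of_ne_nil ht
      have hA : ¬ ((1 : Int) + t.length < 2) := by omega
      have hB : ¬ ((c :: t).length < 2) := by simp; omega
      rw [if_neg hA, if_neg hB]
      set cs := c :: t with hcs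
      -- total = sum of the char codes of cs
      have htot : ((List.map (fun k => (k, ((cs.count k : Nat) : Int))) (PySem.Set.ofList cs)).map
            (fun p => ((p.1.toNat : Int)) * p.2)).sum
          = (cs.map (fun c => (c.toNat : Int))).sum := by
        rw [List.map_map]
        exact pvSumCounts cs (fun c => (c.toNat : Int))
      -- prod fold = product of the char codes of cs, mod 255
      have hprod : ((List.map (fun k => (k, ((cs.count k : Nat) : Int))) (PySem.Set.ofList cs)).foldl
            (fun p q => PySem.Int.mod (p * PySem.Int.powMod ((q.1.toNat : Int)) q.2.toNat 255) 255) 1)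
          = PySem.Int.mod ((cs.map (fun c => (c.toNat : Int))).prod) 255 := by
        rw [List.foldl_map]
        have : ∀ (p : Int) (k : Char),
            PySem.Int.mod (p * PySem.Int.powMod ((k.toNat : Int)) ((cs.count k : Nat) : Int).toNat 255) 255
              = PySem.Int.mod (p * PySem.Int.mod (((k.toNat : Int)) ^ cs.count k) 255) 255 := by
          intro p k
          simp [PySem.Int.powMod]
        simp only [this]
        rw [pvFoldMod (PySem.Set.ofList cs) (fun k => ((k.toNat : Int)) ^ cs.count k) 1 (by norm_num)]
        rw [pvProdCounts cs (fun c => (c.toNat : Int)), one_mul]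
      rw [htot, hprod]
      simp only [hcs, List.map_cons, List.sum_cons, List.prod_cons]
      have hd : |(c.toNat : Int) - (((c.toNat : Int) + (t.map (fun c => (c.toNat : Int))).sum) - (c.toNat : Int))|
          = |(c.toNat : Int) - (0 + (t.map (fun c => (c.toNat : Int))).sum)| := by
        congr 1; ring
      rw [hd]
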